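-- pv_equiv track=rewrite | github.com/unprovable/raptor | core/oci/sbom.py | _split_rfc822_stanzas
-- ===== SOURCE A (Python) =====
-- from typing import Iterator, List, Optional
--
-- def _split_rfc822_stanzas(text: str) -> Iterator[str]:
--     """Split on blank lines. Tolerates Windows line endings."""
--     cur: List[str] = []
--     for line in text.splitlines():
--         if not line.strip():
--             if cur:
--                 yield "\n".join(cur)
--                 cur = []
--         else:
--             cur.append(line)
--     if cur:
--         yield "\n".join(cur)
-- ===== SOURCE B (Python) =====
-- from itertools import groupby
-- from typing import Iterator
--
--
-- def _split_rfc822_stanzas(text: str) -> Iterator[str]: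
--     """Split on blank lines. Tolerates Windows line endings."""
--     for has_content, lines in groupby(text.splitlines(), key=lambda l: bool(l.strip())):
--         if has_content:
--             yield "\n".join(lines)
-- ===== Notes on version B (the rewrite author's own statement) =====
-- stated objective: idiomatic
-- what changed: Replaces the explicit accumulator with its mid-loop reset and trailing flush by itertools.groupby run-partitioning of splitlines(), joining only the non-blank runs.
import Mathlib
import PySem

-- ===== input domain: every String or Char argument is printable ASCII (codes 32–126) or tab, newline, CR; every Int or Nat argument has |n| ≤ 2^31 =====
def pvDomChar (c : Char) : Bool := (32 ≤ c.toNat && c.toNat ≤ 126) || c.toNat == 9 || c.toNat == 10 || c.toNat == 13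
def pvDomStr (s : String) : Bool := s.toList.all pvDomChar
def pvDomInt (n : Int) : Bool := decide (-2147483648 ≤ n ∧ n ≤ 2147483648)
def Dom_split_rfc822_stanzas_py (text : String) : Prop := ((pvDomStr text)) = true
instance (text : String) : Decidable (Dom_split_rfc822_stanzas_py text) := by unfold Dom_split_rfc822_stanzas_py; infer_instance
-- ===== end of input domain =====

-- B replaces A's explicit accumulator/reset/flush loop by groupby run-partitioning of the
-- lines, joining only the non-blank runs (objective: more idiomatic; same cost).
-- A is a generator; both programs are compared as the list of yielded stanzas.

-- ===== PORT A =====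
-- generator loop: cur accumulates non-blank lines, a blank line (or the end) flushes it
def pvALoop : List String → List String → List String
  | [], cur => if cur ≠ [] then [PySem.Str.join "\n" cur] else []
  | line :: rest, cur =>
    if PySem.Str.strip line == "" then
      if cur ≠ [] then PySem.Str.join "\n" cur :: pvALoop rest [] else pvALoop rest cur
    else pvALoop rest (cur ++ [line])

def split_rfc822_stanzas_py (text : String) : List String :=
  pvALoop (PySem.Str.splitlines text) []

-- ===== PORT B =====
-- key=lambda l: bool(l.strip())
def pvBKey (line : String) : Bool := PySem.Str.strip line != ""

-- itertools.groupby: maximal runs of lines with equal key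
def pvGroupby : List String → List (Bool × List String)
  | [] => []
  | l :: ls =>
    (pvBKey l, l :: ls.takeWhile (fun x => pvBKey x == pvBKey l)) ::
      pvGroupby (ls.dropWhile (fun x => pvBKey x == pvBKey l))
termination_by ls => ls.length
decreasing_by
  have := List.length_dropWhile_le (fun x => pvBKey x == pvBKey l) ls
  simp only [List.length_cons]; omega

def split_rfc822_stanzas_py_alt (text : String) : List String :=
  (pvGroupby (PySem.Str.splitlines text)).filterMap
    (fun g => if g.1 then some (PySem.Str.join "\n" g.2) else none)

-- ===== PRECONDITION & SPEC =====
def Spec_split_rfc822_stanzas_py (text : String) (out : List String) : Prop := out = split_rfc822_stanzas_py_alt text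
instance (text : String) (out : List String) : Decidable (Spec_split_rfc822_stanzas_py text out) := by unfold Spec_split_rfc822_stanzas_py; infer_instance

-- ===== CLAIM (what is proved, stated in full; the proofs are below) =====
def Claim_equal_split_rfc822_stanzas_py : Prop := ∀ (text : String), Dom_split_rfc822_stanzas_py text → Spec_split_rfc822_stanzas_py text (split_rfc822_stanzas_py text)

-- ===== LEMMAS AND PROOFS =====

-- the head of a non-empty dropWhile fails the predicate
theorem pvDropWhile_cons_head {α : Type} (p : α → Bool) :
    ∀ (l : List α) (b : α) (t : List α), l.dropWhile p = b :: t → p b = false := by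
  intro l
  induction l with
  | nil => intro b t h; simp [List.dropWhile] at h
  | cons a l ih =>
    intro b t h
    by_cases ha : p a = true
    · rw [List.dropWhile_cons_of_pos ha] at h; exact ih b t h
    · rw [List.dropWhile_cons_of_neg ha] at h
      cases h; simpa using ha

-- a run of blank lines, started with an empty accumulator, is skipped
theorem pvALoop_blank_run (bs rest : List String)
    (h : ∀ b ∈ bs, (PySem.Str.strip b == "") = true) :
    pvALoop (bs ++ rest) [] = pvALoop rest [] := by
  induction bs with
  | nil => rfl
  | cons b bs ih =>
    have hb := h b (by simp)
    simp only [List.cons_append, pvALoop, hb, if_pos, ne_eq, not_true_eq_false, reduceIte]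
    exact ih (fun x hx => h x (by simp [hx]))

-- a run of non-blank lines is appended to the accumulator, one by one
theorem pvALoop_content_run (r : List String)
    (h : ∀ x ∈ r, (PySem.Str.strip x == "") = false) :
    ∀ rest cur, pvALoop (r ++ rest) cur = pvALoop rest (cur ++ r) := by
  induction r with
  | nil => intro rest cur; simp
  | cons x r ih =>
    intro rest cur
    have hx := h x (by simp)
    simp only [List.cons_append, pvALoop, hx]
    rw [ih (fun y hy => h y (by simp [hy])) rest (cur ++ [x])]
    simp

-- main equivalence, by strong induction on the number of lines
theorem pvALoop_eq_groupby : ∀ n (lines : List String), lines.length ≤ n →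
    pvALoop lines [] =
      (pvGroupby lines).filterMap
        (fun g => if g.1 then some (PySem.Str.join "\n" g.2) else none) := by
  intro n
  induction n with
  | zero =>
    intro lines h
    have : lines = [] := List.eq_nil_of_length_eq_zero (Nat.le_zero.mp h)
    subst this; simp [pvALoop, pvGroupby]
  | succ n ih =>
    intro lines hlen
    match lines with
    | [] => simp [pvALoop, pvGroupby]
    | l :: ls =>
      rw [pvGroupby]
      by_cases hl : (PySem.Str.strip l == "") = true
      · -- blank first line: its whole run is skipped by both sides
        have hle : PySem.Str.strip l = "" := by simpa using hl
        have hkey : pvBKey l = false := by simp [pvBKey, hle]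
        have htw : ∀ b ∈ ls.takeWhile (fun x => pvBKey x == pvBKey l),
            (PySem.Str.strip b == "") = true := by
          intro b hb
          have := List.mem_takeWhile_imp hb
          rw [hkey, beq_iff_eq] at this
          simpa [pvBKey] using this
        have hdrop : (ls.dropWhile (fun x => pvBKey x == pvBKey l)).length ≤ n := by
          have := List.length_dropWhile_le (fun x => pvBKey x == pvBKey l) ls
          simp only [List.length_cons] at hlen; omega
        calc pvALoop (l :: ls) [] = pvALoop ls [] := by
              simp [pvALoop, hl]
          _ = pvALoop (ls.takeWhile (fun x => pvBKey x == pvBKey l)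
                ++ ls.dropWhile (fun x => pvBKey x == pvBKey l)) [] := by
              rw [List.takeWhile_append_dropWhile]
          _ = pvALoop (ls.dropWhile (fun x => pvBKey x == pvBKey l)) [] :=
              pvALoop_blank_run _ _ htw
          _ = _ := by rw [ih _ hdrop]; simp [hkey]
      · -- non-blank first line: a whole content run is flushed as one stanza
        have hl' : PySem.Str.strip l ≠ "" := by simpa using hl
        have hkey : pvBKey l = true := by simp [pvBKey, hl']
        have htw : ∀ x ∈ l :: ls.takeWhile (fun x => pvBKey x == pvBKey l),
            (PySem.Str.strip x == "") = false := by
          intro x hx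
          rcases List.mem_cons.mp hx with h | h
          · subst h; simpa using hl'
          · have := List.mem_takeWhile_imp h
            rw [hkey, beq_iff_eq] at this
            simpa [pvBKey] using this
        have hrun := pvALoop_content_run _ htw
          (ls.dropWhile (fun x => pvBKey x == pvBKey l)) []
        have hsplit : l :: ls = (l :: ls.takeWhile (fun x => pvBKey x == pvBKey l))
            ++ ls.dropWhile (fun x => pvBKey x == pvBKey l) := by
          simp [List.takeWhile_append_dropWhile]
        rw [hsplit, hrun]
        rcases hdwe : ls.dropWhile (fun x => pvBKey x == pvBKey l) with _ | ⟨b, dws⟩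
        · simp [pvALoop, pvGroupby, hkey]
        · simp only [List.nil_append, hkey, List.filterMap_cons, reduceIte]
          have hb : pvBKey b = false := by
            have := pvDropWhile_cons_head _ ls b dws hdwe
            rw [hkey] at this
            simpa using this
          have hbblank : (PySem.Str.strip b == "") = true := by
            simpa [pvBKey] using hb
          have hdroplen : (b :: dws).length ≤ n := by
            have := List.length_dropWhile_le (fun x => pvBKey x == pvBKey l) ls
            rw [hdwe] at this
            simp only [List.length_cons] at hlen this ⊢; omega
          have hrest : pvALoop dws [] =
              (pvGroupby (b :: dws)).filterMap
                (fun g => if g.1 then some (PySem.Str.join "\n" g.2) else none) := by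
            have htw2 : ∀ x ∈ dws.takeWhile (fun y => pvBKey y == pvBKey b),
                (PySem.Str.strip x == "") = true := by
              intro x hx
              have := List.mem_takeWhile_imp hx
              rw [hb, beq_iff_eq] at this
              simpa [pvBKey] using this
            have hlen2 : (dws.dropWhile (fun y => pvBKey y == pvBKey b)).length ≤ n := by
              have h1 := List.length_dropWhile_le (fun y => pvBKey y == pvBKey b) dws
              simp only [List.length_cons] at hdroplen; omega
            rw [pvGroupby]
            conv_lhs => rw [← List.takeWhile_append_dropWhile
              (p := fun y => pvBKey y == pvBKey b) (l := dws)]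
            rw [pvALoop_blank_run _ _ htw2, ih _ hlen2]
            simp [hb]
          rw [← hrest]
          simp [pvALoop, hbblank]

-- ===== VERDICT (by name: the statement is the Claim_ definition above) =====
theorem split_rfc822_stanzas_py_spec : Claim_equal_split_rfc822_stanzas_py := by
  intro text _
  unfold Spec_split_rfc822_stanzas_py split_rfc822_stanzas_py split_rfc822_stanzas_py_alt
  exact pvALoop_eq_groupby _ _ (Nat.le_refl _)
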